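-- pv_equiv track=rewrite | github.com/Myunwoo/algorithm_study | hackerrank/count-elements-greater-than-previous-average.py | countResponseTimeRegressions
-- ===== SOURCE A (Python) =====
-- def countResponseTimeRegressions(responseTimes):
--     if len(responseTimes) < 2:
--         return 0
--
--     answer = 0
--     curSum = responseTimes[0]
--     for i in range(1, len(responseTimes)):
--         if curSum < responseTimes[i] * i:
--             answer += 1
--         curSum += responseTimes[i]
--
--     return answer
-- ===== SOURCE B (Python) =====
-- def countResponseTimeRegressions(responseTimes):
--     return sum(1 for i in range(1, len(responseTimes))
--                if sum(responseTimes[:i]) < responseTimes[i] * i)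
-- ===== Notes on version B (the rewrite author's own statement) =====
-- stated objective: simpler
-- what changed: Replaces the guarded running-sum accumulator loop with a single sum-of-indicator comprehension that recomputes each prefix sum via sum(responseTimes[:i]), keeping integer cross-multiplication; no accumulator state and no explicit len<2 guard.
import Mathlib
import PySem

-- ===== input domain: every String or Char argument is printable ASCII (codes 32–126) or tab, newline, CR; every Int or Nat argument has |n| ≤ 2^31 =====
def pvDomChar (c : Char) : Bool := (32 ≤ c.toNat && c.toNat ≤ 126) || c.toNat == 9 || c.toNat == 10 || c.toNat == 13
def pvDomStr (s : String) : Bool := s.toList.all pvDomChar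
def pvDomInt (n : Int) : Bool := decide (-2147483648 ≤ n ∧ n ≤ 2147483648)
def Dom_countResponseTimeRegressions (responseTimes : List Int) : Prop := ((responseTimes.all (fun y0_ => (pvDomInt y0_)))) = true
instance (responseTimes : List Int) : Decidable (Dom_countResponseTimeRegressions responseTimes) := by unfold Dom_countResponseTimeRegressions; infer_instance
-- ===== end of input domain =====

-- B replaces the running-sum accumulator loop with a sum-of-indicator comprehension that
-- recomputes each prefix sum on demand (simpler formulation, same exact integer comparison).

-- ===== PORT A =====
-- literal port of A: guard len<2, then fold over range(1, len) carrying (answer, curSum).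
-- pyGetD with default 0 never defaults: every index used lies in range.
def countResponseTimeRegressions (responseTimes : List Int) : Int :=
  if responseTimes.length < 2 then 0
  else
    ((PySem.List.pyRange 1 (responseTimes.length : Int) 1).foldl
      (fun (st : Int × Int) i =>
        let answer := if st.2 < PySem.List.pyGetD responseTimes i 0 * i then st.1 + 1 else st.1
        (answer, st.2 + PySem.List.pyGetD responseTimes i 0))
      (0, PySem.List.pyGetD responseTimes 0 0)).1

-- ===== PORT B =====
-- literal port of B: sum over i in range(1, len) of the indicator
-- 'sum(responseTimes[:i]) < responseTimes[i] * i'.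
def countResponseTimeRegressions_alt (responseTimes : List Int) : Int :=
  ((PySem.List.pyRange 1 (responseTimes.length : Int) 1).map
    (fun i =>
      if (PySem.List.slice responseTimes none (some i)).sum < PySem.List.pyGetD responseTimes i 0 * i
      then (1 : Int) else 0)).sum

-- ===== PRECONDITION & SPEC =====
def Spec_countResponseTimeRegressions (responseTimes : List Int) (out : Int) : Prop := out = countResponseTimeRegressions_alt responseTimes
instance (responseTimes : List Int) (out : Int) : Decidable (Spec_countResponseTimeRegressions responseTimes out) := by unfold Spec_countResponseTimeRegressions; infer_instance

-- ===== CLAIM (what is proved, stated in full; the proofs are below) =====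
def Claim_equal_countResponseTimeRegressions : Prop := ∀ (responseTimes : List Int), Dom_countResponseTimeRegressions responseTimes → Spec_countResponseTimeRegressions responseTimes (countResponseTimeRegressions responseTimes)

-- ===== LEMMAS AND PROOFS =====

-- Invariant of A's fold over range(1, 1+m): the first component is B's indicator sum over the
-- same range, and the carried curSum is the sum of the first 1+m elements.
theorem crtr_invar (xs : List Int) : ∀ (m : Nat), 1 + m ≤ xs.length →
    ((PySem.List.pyRange 1 ((1 : Int) + (m : Int)) 1).foldl
      (fun (st : Int × Int) i =>
        let answer := if st.2 < PySem.List.pyGetD xs i 0 * i then st.1 + 1 else st.1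
        (answer, st.2 + PySem.List.pyGetD xs i 0))
      (0, PySem.List.pyGetD xs 0 0))
    = ( ((PySem.List.pyRange 1 ((1 : Int) + (m : Int)) 1).map
          (fun i =>
            if (PySem.List.slice xs none (some i)).sum < PySem.List.pyGetD xs i 0 * i
            then (1 : Int) else 0)).sum,
        (xs.take (1 + m)).sum ) := by
  intro m
  induction m with
  | zero =>
    intro h
    have hr : PySem.List.pyRange 1 ((1 : Int) + (0 : Nat)) 1 = [] := by
      apply PySem.List.pyRange_one_eq_nil; norm_num
    rw [hr]
    have h0 : PySem.List.pyGetD xs 0 0 = xs[(0 : Nat)]'(by omega) := by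
      rw [PySem.List.pyGetD_eq_getElem xs 0 (by omega) (by exact_mod_cast (by omega : (0:Int) < (xs.length : Int)))]
      rfl
    match xs, h with
    | a :: t, _ => simp [List.foldl]
  | succ k ih =>
    intro h
    have hk : 1 + k ≤ xs.length := by omega
    have hcast : (1 : Int) + ((k + 1 : Nat) : Int) = ((1 : Int) + (k : Nat)) + 1 := by push_cast; ring
    have hsplit : PySem.List.pyRange 1 ((1 : Int) + ((k + 1 : Nat) : Int)) 1
        = PySem.List.pyRange 1 ((1 : Int) + (k : Nat)) 1 ++ [(1 : Int) + (k : Nat)] := by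
      rw [hcast, PySem.List.pyRange_one_succ_right (by omega)]
    rw [hsplit, List.foldl_append, ih hk, List.map_append, List.sum_append]
    have hidx : (1 : Int) + (k : Nat) = (((1 + k : Nat)) : Int) := by push_cast; ring
    have hget : PySem.List.pyGetD xs ((1 : Int) + (k : Nat)) 0 = xs[(1 + k : Nat)]'(by omega) := by
      rw [hidx, PySem.List.pyGetD_eq_getElem xs 0 (by omega)
        (by exact_mod_cast (by omega : ((1 + k : Nat) : Int) < (xs.length : Int)))]
      have ht : (((1 + k : Nat) : Int)).toNat = 1 + k := by omega
      simp only [ht]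
    have hslice : PySem.List.slice xs none (some ((1 : Int) + (k : Nat))) = xs.take (1 + k) := by
      rw [hidx, PySem.List.slice_to_natCast]
    have htake : (xs.take (1 + (k + 1))).sum = (xs.take (1 + k)).sum + xs[(1 + k : Nat)]'(by omega) := by
      have h1 : 1 + (k + 1) = (1 + k) + 1 := by omega
      have h2 : xs.take ((1 + k) + 1) = xs.take (1 + k) ++ [xs[(1 + k : Nat)]'(by omega)] := by
        rw [List.take_add_one, List.getElem?_eq_getElem (by omega : 1 + k < xs.length)]
        simp
      rw [h1, h2, List.sum_append, List.sum_cons, List.sum_nil, add_zero]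
    simp only [List.foldl, List.map, List.sum_cons, List.sum_nil, hget, hslice, htake]
    split_ifs <;> simp

-- ===== VERDICT (by name: the statement is the Claim_ definition above) =====
theorem countResponseTimeRegressions_spec : Claim_equal_countResponseTimeRegressions := by
  intro xs _
  unfold Spec_countResponseTimeRegressions countResponseTimeRegressions countResponseTimeRegressions_alt
  by_cases hlt : xs.length < 2
  · rw [if_pos hlt]
    have : PySem.List.pyRange 1 (xs.length : Int) 1 = [] := by
      apply PySem.List.pyRange_one_eq_nil; exact_mod_cast (by omega : xs.length ≤ 1)
    rw [this]; simp
  · rw [if_neg hlt]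
    have hm : 1 + (xs.length - 1) ≤ xs.length := by omega
    have hc : ((1 : Int) + ((xs.length - 1 : Nat) : Int)) = (xs.length : Int) := by
      have : 2 ≤ xs.length := by omega
      push_cast [Nat.cast_sub (by omega : 1 ≤ xs.length)]; ring
    have := crtr_invar xs (xs.length - 1) hm
    rw [hc] at this
    rw [this]
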